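-- pv_equiv track=rewrite | github.com/sangiorgiovba/Minecraft_game_2022 | perlin_module.py | hasher
-- ===== SOURCE A (Python) =====
-- from typing import Optional, Union
-- from typing import List, Tuple
-- from typing import Generator, List, Tuple, Union
--
-- def dot(
--     vec1: Union[List, Tuple],
--     vec2: Union[List, Tuple],
-- ) -> Union[float, int]:
--
--     if len(vec1) != len(vec2):
--         raise ValueError('lengths of two vectors are not equal')
--     return sum([val1 * val2 for val1, val2 in zip(vec1, vec2)])
--
-- def hasher(coors: Tuple[int]) -> int:
--
--     return max(
--         1,
--         int(abs(
--             dot(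
--                 [10 ** coordinate for coordinate in range(len(coors))],
--                 coors,
--                 ) + 1,
--         )),
--     )
-- ===== SOURCE B (Python) =====
-- def hasher(coors):
--     total = 0
--     for c in reversed(coors):
--         total = total * 10 + c
--     return max(1, int(abs(total + 1)))
-- ===== Notes on version B (the rewrite author's own statement) =====
-- stated objective: faster
-- what changed: B replaces the powers-of-10 list plus dot-product helper with a single Horner accumulator over the reversed tuple.
import Mathlib
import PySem

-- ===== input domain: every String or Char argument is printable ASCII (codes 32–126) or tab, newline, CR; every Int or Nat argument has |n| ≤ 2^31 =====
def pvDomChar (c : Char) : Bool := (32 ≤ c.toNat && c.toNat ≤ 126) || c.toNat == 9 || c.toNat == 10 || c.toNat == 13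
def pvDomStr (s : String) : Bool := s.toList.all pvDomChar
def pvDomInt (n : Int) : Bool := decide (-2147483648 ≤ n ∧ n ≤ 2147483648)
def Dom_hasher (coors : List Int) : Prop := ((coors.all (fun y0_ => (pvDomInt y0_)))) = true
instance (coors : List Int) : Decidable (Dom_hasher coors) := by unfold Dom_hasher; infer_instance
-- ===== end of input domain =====

-- B replaces the powers-of-10 list plus the dot helper with a single Horner accumulator
-- over the reversed tuple (objective: simpler).

-- ===== PORT A =====
-- dot: sum([v1*v2 for v1, v2 in zip(vec1, vec2)]); the length-mismatch raise is
-- unreachable from hasher (both arguments have length len(coors)).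
def pvDot (vec1 vec2 : List Int) : Int :=
  ((vec1.zip vec2).map (fun p => p.1 * p.2)).sum

def hasher (coors : List Int) : Int :=
  max 1 |pvDot ((List.range coors.length).map (fun i => (10 : Int) ^ i)) coors + 1|

-- ===== PORT B =====
def hasher_alt (coors : List Int) : Int :=
  let total := coors.reverse.foldl (fun t c => t * 10 + c) 0
  max 1 |total + 1|

-- ===== PRECONDITION & SPEC =====
def Spec_hasher (coors : List Int) (out : Int) : Prop := out = hasher_alt coors
instance (coors : List Int) (out : Int) : Decidable (Spec_hasher coors out) := by unfold Spec_hasher; infer_instance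

-- ===== CLAIM (what is proved, stated in full; the proofs are below) =====
def Claim_equal_hasher : Prop := ∀ (coors : List Int), Dom_hasher coors → Spec_hasher coors (hasher coors)

-- ===== LEMMAS AND PROOFS =====
-- weighted power sum with leading factor p equals p times the Horner fold
theorem pv_dot_horner (l : List Int) (p : Int) :
    pvDot ((List.range l.length).map (fun i => p * (10 : Int) ^ i)) l
      = p * l.foldr (fun c t => t * 10 + c) 0 := by
  induction l generalizing p with
  | nil => simp [pvDot]
  | cons c l ih =>
    have h := ih (p * 10)
    simp only [pvDot, List.length_cons, List.range_succ_eq_map, List.map_cons,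
      List.map_map, List.zip_cons_cons, List.sum_cons, List.foldr] at *
    rw [Function.comp_def]
    simp only [pow_succ]
    have hm : List.map (fun x => p * ((10:Int) ^ x * 10)) (List.range l.length)
        = List.map (fun x => p * 10 * (10:Int) ^ x) (List.range l.length) :=
      List.map_congr_left (fun x _ => by ring)
    rw [hm, h]; ring

-- ===== VERDICT (by name: the statement is the Claim_ definition above) =====
theorem hasher_spec : Claim_equal_hasher := by
  intro coors _
  unfold Spec_hasher hasher hasher_alt
  have h := pv_dot_horner coors 1
  simp only [one_mul] at h
  rw [List.foldl_reverse]
  rw [← h]
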